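-- pv_equiv track=rewrite | github.com/xperthunter/aoc | d21/keypad2.py | score_code
-- ===== SOURCE A (Python) =====
-- def score_code(code):
-- 	prev = None
-- 	score = 0
--
-- 	for i in range(0,len(code)-1):
-- 		if code[i+1] != code[i]:
-- 			score += 1
-- 		else:
-- 			score -= 1
--
-- 	return score
-- ===== SOURCE B (Python) =====
-- def score_code(code):
--     # Run-length decomposition: split code into maximal runs of equal chars.
--     # Equal adjacent pairs = n - k, differing pairs = k - 1, so score = 2k - n - 1.
--     if not code:
--         return 0
--     runs = []
--     i = 0
--     n = len(code)
--     while i < n: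
--         j = i
--         while j < n and code[j] == code[i]:
--             j += 1
--         runs.append(j - i)
--         i = j
--     return 2 * len(runs) - n - 1
-- ===== Notes on version B (the rewrite author's own statement) =====
-- stated objective: alternative
-- what changed: Replaces the per-pair +1/-1 accumulation by a run-length decomposition: scan the string into maximal runs of equal characters and return the closed formula 2*runs - len(code) - 1 (equal pairs = n-k, differing pairs = k-1).
import Mathlib
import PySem

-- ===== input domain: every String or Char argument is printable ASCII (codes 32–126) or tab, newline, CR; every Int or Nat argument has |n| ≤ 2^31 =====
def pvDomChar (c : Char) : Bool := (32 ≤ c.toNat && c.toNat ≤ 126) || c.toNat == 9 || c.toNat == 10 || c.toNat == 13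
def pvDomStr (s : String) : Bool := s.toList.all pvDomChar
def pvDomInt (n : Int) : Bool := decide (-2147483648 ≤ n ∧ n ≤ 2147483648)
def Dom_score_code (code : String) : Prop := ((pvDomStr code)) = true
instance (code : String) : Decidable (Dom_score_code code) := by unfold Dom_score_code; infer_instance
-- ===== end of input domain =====

-- B replaces A's per-pair +1/-1 accumulation by a run-length decomposition: it splits the
-- string into maximal runs of equal characters and returns the closed formula 2*k - n - 1.

-- ===== PORT A =====
def score_code (code : String) : Int :=
  (PySem.List.pyRange 0 ((PySem.Str.len code) - 1) 1).foldl
    (fun score i =>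
      if PySem.Str.pyGet? code (i + 1) ≠ PySem.Str.pyGet? code i then score + 1
      else score - 1) 0

-- ===== PORT B =====
-- inner while loop of Source B: how many leading chars of t continue a run of c
def pvRunLen (c : Char) : List Char → Nat
  | [] => 0
  | x :: t => if x == c then 1 + pvRunLen c t else 0

-- outer while loop of Source B: the list of run lengths
def pvRuns : List Char → List Nat
  | [] => []
  | x :: t => (1 + pvRunLen x t) :: pvRuns (t.drop (pvRunLen x t))
termination_by l => l.length
decreasing_by simp [List.length_drop]

def score_code_alt (code : String) : Int :=
  let l := code.toList
  if l.isEmpty then 0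
  else 2 * ((pvRuns l).length : Int) - (l.length : Int) - 1

-- ===== PRECONDITION & SPEC =====
def Spec_score_code (code : String) (out : Int) : Prop := out = score_code_alt code
instance (code : String) (out : Int) : Decidable (Spec_score_code code out) := by unfold Spec_score_code; infer_instance

-- ===== CLAIM (what is proved, stated in full; the proofs are below) =====
def Claim_equal_score_code : Prop := ∀ (code : String), Dom_score_code code → Spec_score_code code (score_code code)

-- ===== LEMMAS AND PROOFS =====

theorem pvRuns_nil : pvRuns [] = [] := by rw [pvRuns.eq_def]

theorem pvRuns_cons (x : Char) (t : List Char) :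
    pvRuns (x :: t) = (1 + pvRunLen x t) :: pvRuns (t.drop (pvRunLen x t)) := by
  rw [pvRuns.eq_def]

theorem pvRunLen_le (c : Char) : ∀ (t : List Char), pvRunLen c t ≤ t.length
  | [] => by simp [pvRunLen]
  | x :: t => by
      simp only [pvRunLen, List.length_cons]
      split
      · have := pvRunLen_le c t; omega
      · omega

-- number of equal adjacent pairs
def pvE : List Char → Nat
  | [] => 0
  | [_] => 0
  | a :: b :: t => (if a == b then 1 else 0) + pvE (b :: t)

-- A's loop on a nonempty string adds (#pairs) - 2 * (#equal pairs) to the accumulator.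
theorem pvLoop_eq : ∀ (t : List Char) (a : Char) (s : Int),
    (List.range ((a :: t).length - 1)).foldl
      (fun sc k => if (a :: t)[k + 1]? ≠ (a :: t)[k]? then sc + 1 else sc - 1) s
    = s + (((a :: t).length : Int) - 1 - 2 * (pvE (a :: t) : Int)) := by
  intro t
  induction t with
  | nil => intro a s; simp [pvE]
  | cons b u ih =>
    intro a s
    have hlen : (a :: b :: u : List Char).length - 1 = (b :: u).length - 1 + 1 := by
      simp
    rw [hlen, List.range_succ_eq_map, List.foldl_cons, List.foldl_map]
    have hfun : (fun (sc : Int) (k : ℕ) =>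
        if (a :: b :: u)[k + 1 + 1]? ≠ (a :: b :: u)[k + 1]? then sc + 1 else sc - 1)
        = (fun (sc : Int) (k : ℕ) =>
        if (b :: u)[k + 1]? ≠ (b :: u)[k]? then sc + 1 else sc - 1) := by
      funext sc k; simp
    rw [hfun]
    have hinit : (if (a :: b :: u)[0 + 1]? ≠ (a :: b :: u)[0]? then s + 1 else s - 1)
        = (if some b ≠ some a then s + 1 else s - 1) := by simp
    rw [hinit, ih b _]
    have hE : pvE (a :: b :: u) = (if a == b then 1 else 0) + pvE (b :: u) := rfl
    rw [hE]
    by_cases hab : b = a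
    · subst hab; simp; ring
    · have h1 : ¬ (a == b) = true := by simp [Ne.symm hab]
      simp [hab, h1]; ring

-- the first run of a :: t absorbs pvRunLen a t equal pairs
theorem pvE_run : ∀ (t : List Char) (a : Char),
    pvE (a :: t) = pvRunLen a t + pvE (t.drop (pvRunLen a t)) := by
  intro t
  induction t with
  | nil => intro a; rfl
  | cons b u ih =>
    intro a
    by_cases hba : b = a
    · subst hba
      simp only [pvRunLen, if_pos (beq_self_eq_true b)]
      have h1 : pvE (b :: b :: u) = 1 + pvE (b :: u) := by simp [pvE]
      rw [h1, ih b]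
      have hd : (b :: u).drop (1 + pvRunLen b u) = u.drop (pvRunLen b u) := by
        rw [Nat.add_comm]; simp [List.drop_succ_cons]
      rw [hd]
      omega
    · have h1 : ¬ (b == a) = true := by simp [hba]
      have h2 : ¬ (a == b) = true := by simp [Ne.symm hba]
      simp [pvRunLen, h1, pvE, h2]

-- run count + equal pairs = length (fuelled induction matching pvRuns's recursion)
theorem pvRuns_plus_E_aux : ∀ (n : ℕ) (l : List Char), l.length ≤ n →
    (pvRuns l).length + pvE l = l.length := by
  intro n
  induction n with
  | zero =>
    intro l h
    have hnil : l = [] := by cases l <;> simp_all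
    rw [hnil, pvRuns_nil]; rfl
  | succ n ih =>
    intro l h
    cases l with
    | nil => rw [pvRuns_nil]; rfl
    | cons x t =>
      rw [pvRuns_cons, pvE_run t x]
      have hle := pvRunLen_le x t
      have hdrop : (t.drop (pvRunLen x t)).length ≤ n := by
        simp only [List.length_drop]
        simp only [List.length_cons] at h
        omega
      have hrec := ih _ hdrop
      simp only [List.length_cons, List.length_drop] at *
      omega

theorem pvRuns_plus_E (l : List Char) : (pvRuns l).length + pvE l = l.length :=
  pvRuns_plus_E_aux l.length l le_rfl

theorem pvE_le : ∀ (a : Char) (t : List Char), pvE (a :: t) + 1 ≤ (a :: t).length := by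
  intro a t
  induction t generalizing a with
  | nil => simp [pvE]
  | cons b u ih =>
    have hE : pvE (a :: b :: u) = (if a == b then 1 else 0) + pvE (b :: u) := rfl
    have h2 := ih b
    rw [hE]
    simp only [List.length_cons] at *
    split_ifs <;> omega

theorem score_code_eq_alt (code : String) : score_code code = score_code_alt code := by
  unfold score_code score_code_alt
  rw [PySem.List.pyRange_one, List.foldl_map]
  have hlen : ((PySem.Str.len code) - 1 - 0).toNat = code.toList.length - 1 := by
    simp [PySem.Str.len_eq]
  rw [hlen]
  have hfun : (fun (sc : Int) (k : ℕ) =>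
      if PySem.Str.pyGet? code ((0 : Int) + k + 1) ≠ PySem.Str.pyGet? code ((0 : Int) + k)
        then sc + 1 else sc - 1)
      = (fun (sc : Int) (k : ℕ) =>
      if code.toList[k + 1]? ≠ code.toList[k]? then sc + 1 else sc - 1) := by
    funext sc k
    have e1 : (0 : Int) + k + 1 = ((k + 1 : ℕ) : Int) := by push_cast; ring
    have e2 : (0 : Int) + k = ((k : ℕ) : Int) := by omega
    rw [e1, e2, PySem.Str.pyGet?_natCast, PySem.Str.pyGet?_natCast]
  rw [hfun]
  cases hc : code.toList with
  | nil => simp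
  | cons a t =>
    rw [pvLoop_eq t a 0]
    have h1 := pvRuns_plus_E (a :: t)
    have h2 := pvE_le a t
    simp only [List.isEmpty_cons, Bool.false_eq_true, if_false, List.length_cons] at *
    omega

-- ===== VERDICT (by name: the statement is the Claim_ definition above) =====
theorem score_code_spec : Claim_equal_score_code := by
  intro code _
  exact score_code_eq_alt code
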